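-- pv_equiv track=rewrite | github.com/truehang/wuzifenpei | xunzhaoluxian.py | jianhuaroute
-- ===== SOURCE A (Python) =====
-- def jianhuaroute(routemin):
--     jianhuaRoute=[]
--     oneline=[]
--     for i in routemin:
--         if i==0:
--             if oneline != [] and set(oneline)!={0}:
--                 jianhuaRoute.append(tuple(oneline))
--             oneline=[]
--         else:
--             pass
--         oneline.append(i)
--     if oneline != [] and set(oneline)!={0}:###处理最后一条路线
--         jianhuaRoute.append(tuple(oneline))
--
--     jianhuaRoute=list(set(jianhuaRoute))
--     ###https://www.w3schools.com/python/ref_list_sort.asp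
--     jianhuaRoute.sort(key=myfunc)
--     jianhuaRoutezd={}
--     lenr=len(jianhuaRoute)
--     idi=1
--     while idi<=lenr:
--         jianhuaRoutezd[idi]=jianhuaRoute[idi-1]
--         idi+=1
--     return jianhuaRoutezd
--
-- def myfunc(e):
--     return e[1]##0之后的第一个点
-- ===== SOURCE B (Python) =====
-- def jianhuaroute(routemin):
--     # Split off one segment at a time: a segment runs from its start to just
--     # before the next zero (every zero starts a new segment).
--     segs = []
--     xs = list(routemin)
--     while xs:
--         k = 1
--         while k < len(xs) and xs[k] != 0:
--             k += 1
--         if any(v != 0 for v in xs[:k]):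
--             segs.append(tuple(xs[:k]))
--         xs = xs[k:]
--     uniq = list(dict.fromkeys(segs))
--     uniq.sort(key=lambda e: e[1])
--     return {i: seg for i, seg in enumerate(uniq, 1)}
-- ===== Notes on version B (the rewrite author's own statement) =====
-- stated objective: alternative
-- what changed: B slices whole segments off the front (scanning to the next zero) instead of A's element-by-element accumulator loop with flushes, dedups with dict.fromkeys in insertion order instead of list(set(...)), and builds the result dict by enumerate(uniq, 1) instead of a while loop indexing with idi-1.
-- outside the precondition, e.g. on jianhuaroute([1, 2, 0, 2]): A returns {1: (0, 2), 2: (1, 2)}, B returns {1: (1, 2), 2: (0, 2)}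
import Mathlib
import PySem

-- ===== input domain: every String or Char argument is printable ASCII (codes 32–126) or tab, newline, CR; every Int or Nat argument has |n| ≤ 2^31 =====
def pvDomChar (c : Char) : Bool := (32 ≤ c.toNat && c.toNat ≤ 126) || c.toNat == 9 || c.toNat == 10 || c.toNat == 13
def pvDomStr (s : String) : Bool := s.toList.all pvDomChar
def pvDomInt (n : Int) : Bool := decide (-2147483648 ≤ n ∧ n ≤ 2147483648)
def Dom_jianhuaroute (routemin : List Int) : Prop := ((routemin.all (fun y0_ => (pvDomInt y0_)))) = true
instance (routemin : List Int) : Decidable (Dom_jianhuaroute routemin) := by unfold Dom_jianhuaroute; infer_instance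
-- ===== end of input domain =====

-- B replaces A's element-by-element accumulator pass with slicing off one whole segment
-- (up to the next zero) at a time, dedups with dict.fromkeys instead of list(set(...)),
-- and builds the result dict by enumerate instead of a while loop (objective: alternative).

-- ===== PORT A =====
-- `oneline != [] and set(oneline) != {0}` (Python set equality is PySem.Set.equal)
def pvFlushCond (one : List Int) : Bool :=
  decide (one ≠ []) && !(PySem.Set.equal (PySem.Set.ofList one) (PySem.Set.ofList [0]))

-- loop body of A's `for i in routemin` (state: (jianhuaRoute, oneline))
def pvStepA (st : List (List Int) × List Int) (i : Int) : List (List Int) × List Int :=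
  if i = 0 then
    ((if pvFlushCond st.2 then st.1 ++ [st.2] else st.1), ([] : List Int) ++ [i])
  else
    (st.1, st.2 ++ [i])

-- the final flush after the loop
def pvFlushA (st : List (List Int) × List Int) : List (List Int) :=
  if pvFlushCond st.2 then st.1 ++ [st.2] else st.1

def jianhuaroute (routemin : List Int) : List (Int × List Int) :=
  let st := routemin.foldl pvStepA ([], [])
  let jh := pvFlushA st
  let jh := PySem.Set.ofList jh                                   -- list(set(...))
  -- key=myfunc, myfunc e = e[1]; exact under Pre_ (every kept segment has length ≥ 2)
  let jh := PySem.List.sorted jh (fun e => PySem.List.pyGetD e 1 0) false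
  let lenr : Int := jh.length
  -- while idi <= lenr: jianhuaRoutezd[idi] = jianhuaRoute[idi-1]
  let d := (PySem.List.pyRange 1 (lenr + 1) 1).foldl
      (fun (d : PySem.Dict Int (List Int)) idi =>
        d.insert idi (PySem.List.pyGetD jh (idi - 1) [])) PySem.Dict.empty
  d.items

-- ===== PORT B =====
-- `while xs:` slice off one segment per step; the inner `while k < len(xs) and xs[k] != 0`
-- scan is the takeWhile length, `xs[:k]` / `xs[k:]` are take / drop
def pvChunks : List Int → List (List Int)
  | [] => []
  | x :: rest =>
    let k := 1 + (rest.takeWhile (fun v => v != 0)).length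
    let seg := (x :: rest).take k
    if seg.any (fun v => v != 0) then seg :: pvChunks ((x :: rest).drop k)
    else pvChunks ((x :: rest).drop k)
  termination_by xs => xs.length
  decreasing_by
    all_goals simp

def jianhuaroute_alt (routemin : List Int) : List (Int × List Int) :=
  let uniq := PySem.List.dedup (pvChunks routemin)                -- list(dict.fromkeys(segs))
  let uniq := PySem.List.sorted uniq (fun e => PySem.List.pyGetD e 1 0) false
  -- {i: seg for i, seg in enumerate(uniq, 1)}: keys 1..n are distinct, so the
  -- dict's items are exactly these pairs in order
  PySem.List.enumerate uniq 1

-- ===== PRECONDITION & SPEC =====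
-- declarative description (zero positions + slices) of the kept segments, used only by Pre_
def pvKeptSegs (r : List Int) : List (List Int) :=
  let zs := (List.range r.length).filter (fun i => r.getD i 1 = 0)
  let starts := if zs.head? = some 0 then zs else 0 :: zs
  let bounds := starts.zip (starts.tail ++ [r.length])
  (bounds.map (fun p => (r.drop p.1).take (p.2 - p.1))).filter (fun s => s.any (fun v => v != 0))

-- Pre_ excludes inputs where A raises IndexError in the sort key (a kept segment of
-- length 1), and inputs where two distinct kept segments share the same second element,
-- on which A's output order is an accident of Python's set iteration order.
def Pre_jianhuaroute (routemin : List Int) : Prop :=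
  (∀ s ∈ pvKeptSegs routemin, 2 ≤ s.length) ∧
  (PySem.List.dedup (pvKeptSegs routemin)).Pairwise (fun s t => s.getD 1 0 ≠ t.getD 1 0)
instance (routemin : List Int) : Decidable (Pre_jianhuaroute routemin) := by
  unfold Pre_jianhuaroute; infer_instance

def pvWitness_jianhuaroute : List Int := [1, 2, 0, 3, 2]

def Spec_jianhuaroute (routemin : List Int) (out : List (Int × List Int)) : Prop := out = jianhuaroute_alt routemin
instance (routemin : List Int) (out : List (Int × List Int)) : Decidable (Spec_jianhuaroute routemin out) := by unfold Spec_jianhuaroute; infer_instance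

-- ===== CLAIM (what is proved, stated in full; the proofs are below) =====
def Claim_equal_jianhuaroute : Prop := ∀ (routemin : List Int), Dom_jianhuaroute routemin → Pre_jianhuaroute routemin → Spec_jianhuaroute routemin (jianhuaroute routemin)

-- ===== LEMMAS AND PROOFS =====

-- A's flush test `oneline != [] and set(oneline) != {0}` is "some element is nonzero"
lemma pvFlushCond_eq (one : List Int) : pvFlushCond one = one.any (fun v => v != 0) := by
  cases one with
  | nil => simp [pvFlushCond]
  | cons x t =>
    have h : PySem.Set.equal (PySem.Set.ofList (x :: t)) (PySem.Set.ofList [0])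
        = !((x :: t).any (fun v => v != 0)) := by
      by_cases hz : ∃ v ∈ x :: t, v ≠ 0
      · obtain ⟨v, hv, hv0⟩ := hz
        have hne : ¬ (PySem.Set.equal (PySem.Set.ofList (x :: t)) (PySem.Set.ofList [0]) = true) := by
          rw [PySem.Set.equal_iff]
          intro hall
          have := (hall v).mp ((PySem.Set.mem_ofList _ _).mpr hv)
          rw [PySem.Set.mem_ofList] at this
          simp at this
          exact hv0 this
        have hany : (x :: t).any (fun v => v != 0) = true := by
          simp only [List.any_eq_true]
          exact ⟨v, hv, by simpa using hv0⟩
        simp [hany, Bool.eq_false_iff.mpr hne]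
      · push Not at hz
        have heq : PySem.Set.equal (PySem.Set.ofList (x :: t)) (PySem.Set.ofList [0]) = true := by
          rw [PySem.Set.equal_iff]
          intro y
          rw [PySem.Set.mem_ofList, PySem.Set.mem_ofList]
          constructor
          · intro hy; simpa using hz y hy
          · intro hy
            simp at hy
            subst hy
            have hx0 := hz x (List.mem_cons_self)
            rw [← hx0]
            exact List.mem_cons_self
        have hany : (x :: t).any (fun v => v != 0) = false := by
          simp only [List.any_eq_false]
          intro v hv; simpa using hz v hv
        simp [hany, heq]
    simp [pvFlushCond, h]

lemma take_takeWhile_len (l : List Int) (p : Int → Bool) :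
    l.take (l.takeWhile p).length = l.takeWhile p :=
  (List.prefix_iff_eq_take.mp (List.takeWhile_prefix p)).symm

lemma drop_takeWhile_len (l : List Int) (p : Int → Bool) :
    l.drop (l.takeWhile p).length = l.dropWhile p := by
  induction l with
  | nil => rfl
  | cons x t ih =>
    by_cases hx : p x
    · simp [hx, ih]
    · simp [hx]

-- one unfolding step of pvChunks on a nonempty list, phrased with takeWhile/dropWhile
lemma pvChunks_cons (x : Int) (xs : List Int) :
    pvChunks (x :: xs) =
      (if (x :: xs.takeWhile (fun v => v != 0)).any (fun v => v != 0)
        then [x :: xs.takeWhile (fun v => v != 0)] else [])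
      ++ pvChunks (xs.dropWhile (fun v => v != 0)) := by
  rw [pvChunks]
  have htake : (x :: xs).take (1 + (xs.takeWhile (fun v => v != 0)).length)
      = x :: xs.takeWhile (fun v => v != 0) := by
    rw [Nat.add_comm, List.take_succ_cons, take_takeWhile_len]
  have hdrop : (x :: xs).drop (1 + (xs.takeWhile (fun v => v != 0)).length)
      = xs.dropWhile (fun v => v != 0) := by
    rw [Nat.add_comm, List.drop_succ_cons, drop_takeWhile_len]
  rw [htake, hdrop]
  split <;> simp

-- the accumulator loop of A, started on a nonempty oneline, produces exactly the
-- (kept) current chunk followed by the chunks of the rest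
lemma segsA_chunks (xs : List Int) : ∀ (jh : List (List Int)) (one : List Int), one ≠ [] →
    pvFlushA (xs.foldl pvStepA (jh, one)) =
      jh ++ (if (one ++ xs.takeWhile (fun v => v != 0)).any (fun v => v != 0)
              then [one ++ xs.takeWhile (fun v => v != 0)] else [])
         ++ pvChunks (xs.dropWhile (fun v => v != 0)) := by
  induction xs with
  | nil =>
    intro jh one hone
    simp [pvFlushA, pvFlushCond_eq, pvChunks]
    split <;> simp
  | cons x t ih =>
    intro jh one hone
    by_cases hx : x = 0
    · subst hx
      have hstep : pvStepA (jh, one) 0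
          = ((if pvFlushCond one then jh ++ [one] else jh), [0]) := by
        simp [pvStepA]
      rw [List.foldl_cons, hstep, ih _ [0] (by simp)]
      have h0 : (List.takeWhile (fun v => v != 0) ((0 : Int) :: t)) = [] := by
        simp
      have h0' : (List.dropWhile (fun v => v != 0) ((0 : Int) :: t)) = (0 : Int) :: t := by
        simp
      rw [h0, h0', pvChunks_cons, pvFlushCond_eq]
      simp only [List.append_nil, List.cons_append, List.nil_append]
      split_ifs <;> simp [List.append_assoc]
    · have hstep : pvStepA (jh, one) x = (jh, one ++ [x]) := by
        simp [pvStepA, hx]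
      rw [List.foldl_cons, hstep, ih _ (one ++ [x]) (by simp)]
      have htw : List.takeWhile (fun v => v != 0) (x :: t)
          = x :: List.takeWhile (fun v => v != 0) t := by
        simp [hx]
      have hdw : List.dropWhile (fun v => v != 0) (x :: t)
          = List.dropWhile (fun v => v != 0) t := by
        simp [hx]
      rw [htw, hdw]
      simp [List.append_assoc]

-- A's whole segment-collection phase equals B's chunking
lemma flushA_eq_chunks (r : List Int) :
    pvFlushA (r.foldl pvStepA ([], [])) = pvChunks r := by
  cases r with
  | nil => simp [pvFlushA, pvFlushCond, pvChunks]
  | cons x t =>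
    by_cases hx : x = 0
    · subst hx
      have hstep : pvStepA ([], []) 0 = ([], [0]) := by simp [pvStepA, pvFlushCond]
      rw [List.foldl_cons, hstep, segsA_chunks _ _ [0] (by simp)]
      conv_rhs => rw [pvChunks_cons]
      simp only [List.cons_append, List.nil_append]
    · have hstep : pvStepA ([], []) x = ([], [x]) := by simp [pvStepA, hx]
      rw [List.foldl_cons, hstep, segsA_chunks _ _ [x] (by simp)]
      conv_rhs => rw [pvChunks_cons]
      simp only [List.cons_append, List.nil_append]

-- xs[j] on a cons for a positive index
lemma pyGetD_cons_pos (x : List Int) (t : List (List Int)) (j : Int) (d : List Int)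
    (h1 : 1 ≤ j) (h2 : j < (t.length : Int) + 1) :
    PySem.List.pyGetD (x :: t) j d = PySem.List.pyGetD t (j - 1) d := by
  obtain ⟨n, rfl⟩ : ∃ n : Nat, j = (n : Int) := ⟨j.toNat, by omega⟩
  have hn : 1 ≤ n := by exact_mod_cast h1
  have hcast : ((n : Int) - 1) = ((n - 1 : Nat) : Int) := by omega
  rw [PySem.List.pyGetD_natCast, hcast, PySem.List.pyGetD_natCast]
  cases n with
  | zero => omega
  | succ m => simp

-- the index loop `(i, jh[i-s]) for i in range(s, s+len)` is enumerate(jh, s)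
lemma map_range_enumerate (jh : List (List Int)) : ∀ (s : Int),
    (PySem.List.pyRange s (s + (jh.length : Int)) 1).map
        (fun i => (i, PySem.List.pyGetD jh (i - s) []))
      = PySem.List.enumerate jh s := by
  induction jh with
  | nil =>
    intro s
    have h : s + (([] : List (List Int)).length : Int) = s := by simp
    rw [h, PySem.List.pyRange_one_eq_nil (le_refl s)]
    simp [PySem.List.enumerate]
  | cons x t ih =>
    intro s
    rw [PySem.List.pyRange_one_cons (by simp)]
    rw [List.map_cons]
    have hhd : PySem.List.pyGetD (x :: t) (s - s) [] = x := by
      simp [PySem.List.pyGetD_zero_cons]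
    rw [hhd]
    have hrange : s + ((x :: t).length : Int) = (s + 1) + (t.length : Int) := by
      simp; omega
    rw [hrange]
    have hmap : (PySem.List.pyRange (s + 1) ((s + 1) + (t.length : Int)) 1).map
          (fun i => (i, PySem.List.pyGetD (x :: t) (i - s) []))
        = (PySem.List.pyRange (s + 1) ((s + 1) + (t.length : Int)) 1).map
          (fun i => (i, PySem.List.pyGetD t (i - (s + 1)) [])) := by
      apply List.map_congr_left
      intro i hi
      rw [PySem.List.mem_pyRange_one] at hi
      have : i - (s + 1) = (i - s) - 1 := by omega
      rw [pyGetD_cons_pos x t (i - s) [] (by omega) (by omega), ← this]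
    rw [hmap, ih (s + 1)]
    rw [PySem.List.enumerate]

-- A's while loop builds the dict whose items are enumerate(jh, 1)
lemma dict_loop_eq_enumerate (jh : List (List Int)) :
    ((PySem.List.pyRange 1 ((jh.length : Int) + 1) 1).foldl
        (fun (d : PySem.Dict Int (List Int)) idi =>
          d.insert idi (PySem.List.pyGetD jh (idi - 1) [])) PySem.Dict.empty).items
      = PySem.List.enumerate jh 1 := by
  rw [PySem.Dict.items_foldl_insert_fresh _ (fun idi => idi)
        (fun idi => PySem.List.pyGetD jh (idi - 1) []) PySem.Dict.empty
        (fun a _ => PySem.Dict.contains_empty a)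
        (by simpa using PySem.List.nodup_pyRange_one 1 ((jh.length : Int) + 1))]
  have : (1 : Int) + (jh.length : Int) = (jh.length : Int) + 1 := by omega
  rw [← this, map_range_enumerate jh 1]
  simp [PySem.Dict.empty]

-- ===== VERDICT (by name: the statement is the Claim_ definition above) =====
theorem jianhuaroute_spec : Claim_equal_jianhuaroute := by
  intro routemin _hdom _hpre
  unfold Spec_jianhuaroute jianhuaroute jianhuaroute_alt
  dsimp only
  rw [flushA_eq_chunks, PySem.List.dedup_eq_ofList]
  exact dict_loop_eq_enumerate _
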